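-- pv_equiv track=rewrite | github.com/JeanMarie3/ste-platform | agent/app/adapters/web.py | _derive_run_status
-- ===== SOURCE A (Python) =====
-- from typing import Any
--
-- def _derive_run_status(steps: list[dict[str, Any]]) -> str:
--     verdicts = {str(step.get("verdict", {}).get("status") or "").strip().lower() for step in steps}
--
--     if "failed" in verdicts:
--         return "failed"
--     if "blocked" in verdicts:
--         return "blocked"
--     if "suspicious" in verdicts:
--         return "suspicious"
--     if "inconclusive" in verdicts:
--         return "inconclusive"
--     return "passed"
-- ===== SOURCE B (Python) =====
-- _NAMES = ["failed", "blocked", "suspicious", "inconclusive", "passed"]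
--
--
-- def _rank(status):
--     # lower index = higher priority; anything unrecognized counts as "passed"
--     return _NAMES.index(status) if status in _NAMES else len(_NAMES) - 1
--
--
-- def _derive_run_status(steps):
--     best = len(_NAMES) - 1
--     for step in steps:
--         r = _rank(str(step.get("verdict", {}).get("status") or "").strip().lower())
--         if r < best:
--             best = r
--     return _NAMES[best]
-- ===== Notes on version B (the rewrite author's own statement) =====
-- stated objective: alternative
-- what changed: Replaces building a set of all verdict statuses and probing it with a chain of membership tests by a single min-reduce: each status is mapped to a priority rank and the running minimum rank is kept in one accumulator pass, the final rank being mapped back to its name.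
import Mathlib
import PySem

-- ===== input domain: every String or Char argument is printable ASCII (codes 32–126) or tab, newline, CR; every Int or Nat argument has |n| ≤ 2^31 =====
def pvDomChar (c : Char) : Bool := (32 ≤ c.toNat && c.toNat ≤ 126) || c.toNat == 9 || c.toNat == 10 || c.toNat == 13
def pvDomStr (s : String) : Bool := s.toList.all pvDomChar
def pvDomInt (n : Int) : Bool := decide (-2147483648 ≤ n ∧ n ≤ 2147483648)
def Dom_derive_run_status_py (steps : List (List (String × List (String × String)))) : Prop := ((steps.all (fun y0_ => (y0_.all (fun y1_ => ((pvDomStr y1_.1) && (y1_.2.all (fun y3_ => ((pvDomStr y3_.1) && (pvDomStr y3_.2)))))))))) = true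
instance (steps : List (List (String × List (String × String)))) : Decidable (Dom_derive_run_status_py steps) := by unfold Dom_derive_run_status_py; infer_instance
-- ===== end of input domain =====

-- B replaces A's "build a set of statuses, probe it in priority order" by a single
-- min-reduce over priority ranks (objective: alternative, same cost).

-- ===== PORT A =====
-- shared helper: str(step.get("verdict", {}).get("status") or "").strip().lower()
-- (identical expression in both Pythons; `x or ""` on an Optional[str] is exactly .get with default "")
def pvStatus (step : List (String × List (String × String))) : String :=
  PySem.Str.lower (PySem.Str.strip
    (PySem.Dict.getD (PySem.Dict.mk (PySem.Dict.getD (PySem.Dict.mk step) "verdict" [])) "status" ""))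

def derive_run_status_py (steps : List (List (String × List (String × String)))) : String :=
  let verdicts : PySem.Set String := PySem.Set.ofList (steps.map pvStatus)
  if verdicts.contains "failed" then "failed"
  else if verdicts.contains "blocked" then "blocked"
  else if verdicts.contains "suspicious" then "suspicious"
  else if verdicts.contains "inconclusive" then "inconclusive"
  else "passed"

-- ===== PORT B =====
def pvNames : List String := ["failed", "blocked", "suspicious", "inconclusive", "passed"]

-- _rank: NAMES.index(status) if status in NAMES else len(NAMES) - 1
def pvRank (status : String) : Int :=
  if pvNames.contains status then (((PySem.List.index? pvNames status).getD 0 : Nat) : Int)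
  else (pvNames.length : Int) - 1

def derive_run_status_py_alt (steps : List (List (String × List (String × String)))) : String :=
  let best : Int := steps.foldl
    (fun best step =>
      let r := pvRank (pvStatus step)
      if r < best then r else best)
    ((pvNames.length : Int) - 1)
  -- NAMES[best]: best is always a valid rank 0..4, so the default is never used
  PySem.List.pyGetD pvNames best ""

-- ===== PRECONDITION & SPEC =====
def Spec_derive_run_status_py (steps : List (List (String × List (String × String)))) (out : String) : Prop := out = derive_run_status_py_alt steps
instance (steps : List (List (String × List (String × String)))) (out : String) : Decidable (Spec_derive_run_status_py steps out) := by unfold Spec_derive_run_status_py; infer_instance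

-- ===== CLAIM (what is proved, stated in full; the proofs are below) =====
def Claim_equal_derive_run_status_py : Prop := ∀ (steps : List (List (String × List (String × String)))), Dom_derive_run_status_py steps → Spec_derive_run_status_py steps (derive_run_status_py steps)

-- ===== LEMMAS AND PROOFS =====

-- B's fold over the statuses of the steps
def pvFold (l : List String) (b : Int) : Int :=
  l.foldl (fun best s => let r := pvRank s; if r < best then r else best) b

lemma pvFold_le_init (l : List String) (b : Int) : pvFold l b ≤ b := by
  induction l generalizing b with
  | nil => simp [pvFold]
  | cons s t ih =>
      simp only [pvFold, List.foldl_cons] at *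
      refine le_trans (ih _) ?_
      split <;> omega

lemma pvFold_le_mem (l : List String) (b : Int) {s : String} (hs : s ∈ l) :
    pvFold l b ≤ pvRank s := by
  induction l generalizing b with
  | nil => cases hs
  | cons x t ih =>
      simp only [pvFold, List.foldl_cons] at *
      rcases List.mem_cons.mp hs with h | h
      · subst h
        refine le_trans (pvFold_le_init t _) ?_
        split <;> omega
      · exact ih _ h

lemma pvFold_cases (l : List String) (b : Int) :
    pvFold l b = b ∨ ∃ s ∈ l, pvFold l b = pvRank s := by
  induction l generalizing b with
  | nil => left; simp [pvFold]
  | cons x t ih =>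
      simp only [pvFold, List.foldl_cons] at *
      rcases ih (if pvRank x < b then pvRank x else b) with h | ⟨s, hs, h⟩
      · by_cases hx : pvRank x < b
        · right; exact ⟨x, List.mem_cons_self, by rw [h, if_pos hx]⟩
        · left; rw [h, if_neg hx]
      · right; exact ⟨s, List.mem_cons_of_mem _ hs, h⟩

-- rank value of every string
lemma pvRank_cases (s : String) :
    (s = "failed" ∧ pvRank s = 0) ∨ (s = "blocked" ∧ pvRank s = 1) ∨
    (s = "suspicious" ∧ pvRank s = 2) ∨ (s = "inconclusive" ∧ pvRank s = 3) ∨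
    pvRank s = 4 := by
  by_cases h : pvNames.contains s = true
  · have hmem : s ∈ pvNames := by simpa using h
    simp only [pvNames, List.mem_cons, List.not_mem_nil, or_false] at hmem
    rcases hmem with h' | h' | h' | h' | h' <;> subst h' <;> decide
  · have : pvRank s = 4 := by
      unfold pvRank
      rw [if_neg h]
      decide
    tauto

lemma pvRank_nonneg (s : String) : 0 ≤ pvRank s := by
  rcases pvRank_cases s with ⟨_, h⟩ | ⟨_, h⟩ | ⟨_, h⟩ | ⟨_, h⟩ | h <;> omega

-- A's chain, as a function of the status list
lemma portA_eq_chain (steps : List (List (String × List (String × String)))) :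
    derive_run_status_py steps =
      (let l := steps.map pvStatus
       if "failed" ∈ l then "failed"
       else if "blocked" ∈ l then "blocked"
       else if "suspicious" ∈ l then "suspicious"
       else if "inconclusive" ∈ l then "inconclusive"
       else "passed") := by
  simp only [derive_run_status_py]
  by_cases h1 : "failed" ∈ steps.map pvStatus <;>
  by_cases h2 : "blocked" ∈ steps.map pvStatus <;>
  by_cases h3 : "suspicious" ∈ steps.map pvStatus <;>
  by_cases h4 : "inconclusive" ∈ steps.map pvStatus <;>
    simp [PySem.Set.mem_ofList, h1, h2, h3, h4]

-- B's result, as a function of the status list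
lemma portB_eq_fold (steps : List (List (String × List (String × String)))) :
    derive_run_status_py_alt steps =
      PySem.List.pyGetD pvNames (pvFold (steps.map pvStatus) 4) "" := by
  simp only [derive_run_status_py_alt, pvFold, List.foldl_map, pvNames]
  norm_num

lemma pvFold_eq_of_mem_of_min (l : List String) (name : String) (k : Int)
    (hk : k ≤ 4) (hname : name ∈ l) (hrank : pvRank name = k)
    (hmin : ∀ s ∈ l, pvRank s ≥ k) : pvFold l 4 = k := by
  have h1 : pvFold l 4 ≤ k := hrank ▸ pvFold_le_mem l 4 hname
  rcases pvFold_cases l 4 with h | ⟨s, hs, h⟩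
  · have := hmin name hname
    omega
  · have := hmin s hs
    omega

-- ===== VERDICT (by name: the statement is the Claim_ definition above) =====
theorem derive_run_status_py_spec : Claim_equal_derive_run_status_py := by
  intro steps _
  show derive_run_status_py steps = derive_run_status_py_alt steps
  rw [portA_eq_chain, portB_eq_fold]
  set l := steps.map pvStatus with hl
  by_cases h1 : "failed" ∈ l
  · have : pvFold l 4 = 0 :=
      pvFold_eq_of_mem_of_min l "failed" 0 (by omega) h1 (by decide)
        (fun s _ => by have := pvRank_nonneg s; omega)
    simp [h1, this]
    decide
  · by_cases h2 : "blocked" ∈ l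
    · have : pvFold l 4 = 1 := by
        refine pvFold_eq_of_mem_of_min l "blocked" 1 (by omega) h2 (by decide) ?_
        intro s hs
        rcases pvRank_cases s with ⟨he, hr⟩ | ⟨he, hr⟩ | ⟨he, hr⟩ | ⟨he, hr⟩ | hr
        · exact absurd (he ▸ hs) h1
        · omega
        · omega
        · omega
        · omega
      simp [h1, h2, this]
      decide
    · by_cases h3 : "suspicious" ∈ l
      · have : pvFold l 4 = 2 := by
          refine pvFold_eq_of_mem_of_min l "suspicious" 2 (by omega) h3 (by decide) ?_
          intro s hs
          rcases pvRank_cases s with ⟨he, hr⟩ | ⟨he, hr⟩ | ⟨he, hr⟩ | ⟨he, hr⟩ | hr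
          · exact absurd (he ▸ hs) h1
          · exact absurd (he ▸ hs) h2
          · omega
          · omega
          · omega
        simp [h1, h2, h3, this]
        decide
      · by_cases h4 : "inconclusive" ∈ l
        · have : pvFold l 4 = 3 := by
            refine pvFold_eq_of_mem_of_min l "inconclusive" 3 (by omega) h4 (by decide) ?_
            intro s hs
            rcases pvRank_cases s with ⟨he, hr⟩ | ⟨he, hr⟩ | ⟨he, hr⟩ | ⟨he, hr⟩ | hr
            · exact absurd (he ▸ hs) h1
            · exact absurd (he ▸ hs) h2
            · exact absurd (he ▸ hs) h3
            · omega
            · omega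
          simp [h1, h2, h3, h4, this]
          decide
        · have : pvFold l 4 = 4 := by
            rcases pvFold_cases l 4 with h | ⟨s, hs, h⟩
            · exact h
            · rcases pvRank_cases s with ⟨he, hr⟩ | ⟨he, hr⟩ | ⟨he, hr⟩ | ⟨he, hr⟩ | hr
              · exact absurd (he ▸ hs) h1
              · exact absurd (he ▸ hs) h2
              · exact absurd (he ▸ hs) h3
              · exact absurd (he ▸ hs) h4
              · omega
          simp [h1, h2, h3, h4, this]
          decide
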